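-- pv_equiv track=rewrite | github.com/chunli-peng/leetcode-answers | 4. Binary Search/1898. Maximum Number of Removable Characters.py | check_subseq
-- ===== SOURCE A (Python) =====
-- def check_subseq(s: str, p: str, removed: set) -> bool:
--     i, j = 0, 0
--     while i < len(s) and j < len(p):
--         if i in removed or s[i] != p[j]:
--             i += 1
--         else:
--             i += 1
--             j += 1
--     return j == len(p)
-- ===== SOURCE B (Python) =====
-- def check_subseq(s: str, p: str, removed: set) -> bool:
--     # index surviving occurrences: char -> increasing list of positions
--     pos = {}
--     for k, c in enumerate(s):
--         if k not in removed:
--             pos.setdefault(c, []).append(k)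
--     last = -1
--     for ch in p:
--         lst = pos.get(ch)
--         if lst is None:
--             return False
--         # binary search: first position in lst strictly greater than last
--         lo, hi = 0, len(lst)
--         while lo < hi:
--             mid = (lo + hi) // 2
--             if lst[mid] <= last:
--                 lo = mid + 1
--             else:
--                 hi = mid
--         if lo == len(lst):
--             return False
--         last = lst[lo]
--     return True
-- ===== Notes on version B (the rewrite author's own statement) =====
-- stated objective: alternative
-- what changed: Replaces A's single two-pointer scan by a staged algorithm: one pass builds a char->increasing-positions index of surviving characters, then each pattern character is resolved by a hand-written binary search for the first indexed position after the previous match.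
import Mathlib
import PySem

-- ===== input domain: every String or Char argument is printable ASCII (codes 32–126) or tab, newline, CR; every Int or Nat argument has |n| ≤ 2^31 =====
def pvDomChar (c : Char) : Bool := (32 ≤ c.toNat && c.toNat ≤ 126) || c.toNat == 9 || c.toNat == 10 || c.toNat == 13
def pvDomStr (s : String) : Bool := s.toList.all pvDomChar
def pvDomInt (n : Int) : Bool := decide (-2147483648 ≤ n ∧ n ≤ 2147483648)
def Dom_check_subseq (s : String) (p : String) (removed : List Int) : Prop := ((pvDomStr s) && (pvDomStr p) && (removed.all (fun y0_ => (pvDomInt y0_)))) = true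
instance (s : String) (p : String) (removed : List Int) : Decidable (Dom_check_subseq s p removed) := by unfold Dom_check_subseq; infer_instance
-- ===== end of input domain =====

-- B replaces A's two-pointer scan by a staged algorithm: build a char → increasing list of
-- surviving positions once, then binary-search each pattern character's next usable position.
-- Same results; no speed claim.

-- ===== PORT A =====
-- A's while loop: i walks s, j walks p; each iteration increments i, so recursion on
-- the remaining suffix of s (cs) with the running index i and remaining suffix of p (ps).
def aLoop (cs : List Char) (i : Int) (ps : List Char) (removed : List Int) : Bool :=
  match cs with
  | [] => ps.isEmpty            -- loop exit: i = len(s); return j == len(p)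
  | c :: cs' =>
    match ps with
    | [] => true                 -- loop exit: j = len(p)
    | q :: ps' =>
      if removed.contains i || c ≠ q then aLoop cs' (i + 1) (q :: ps') removed
      else aLoop cs' (i + 1) ps' removed

def check_subseq (s : String) (p : String) (removed : List Int) : Bool :=
  aLoop s.toList 0 p.toList removed

-- ===== PORT B =====
-- the hand-written bisection 'while lo < hi: …' (first index with lst[index] > last);
-- fuel = an upper bound on hi - lo (the loop shrinks hi - lo each iteration): it only
-- makes the recursion structural, the computation is the Python loop's
def bisectGT (lst : List Int) (last : Int) : Nat → Nat → Nat → Nat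
  | 0, lo, _ => lo
  | fuel + 1, lo, hi =>
    if lo < hi then
      let mid := (lo + hi) / 2
      if lst.getD mid 0 ≤ last then bisectGT lst last fuel (mid + 1) hi
      else bisectGT lst last fuel lo mid
    else lo

-- 'for ch in p: …' consuming the index via binary search
def bLoop (d : PySem.Dict Char (List Int)) (ps : List Char) (last : Int) : Bool :=
  match ps with
  | [] => true
  | q :: ps' =>
    match d.get? q with
    | none => false
    | some lst =>
      let lo := bisectGT lst last lst.length 0 lst.length
      if lo = lst.length then false
      else bLoop d ps' (lst.getD lo 0)

-- pos = {}; for k, c in enumerate(s): if k not in removed: pos.setdefault(c, []).append(k)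
def check_subseq_alt (s : String) (p : String) (removed : List Int) : Bool :=
  let pos := (PySem.List.enumerate s.toList 0).foldl
    (fun d t => if removed.contains t.1 then d else d.modify t.2 [] (· ++ [t.1]))
    PySem.Dict.empty
  bLoop pos p.toList (-1)

-- ===== PRECONDITION & SPEC =====
def Spec_check_subseq (s : String) (p : String) (removed : List Int) (out : Bool) : Prop := out = check_subseq_alt s p removed
instance (s : String) (p : String) (removed : List Int) (out : Bool) : Decidable (Spec_check_subseq s p removed out) := by unfold Spec_check_subseq; infer_instance

-- ===== CLAIM (what is proved, stated in full; the proofs are below) =====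
def Claim_equal_check_subseq : Prop := ∀ (s : String) (p : String) (removed : List Int), Dom_check_subseq s p removed → Spec_check_subseq s p removed (check_subseq s p removed)

-- ===== LEMMAS AND PROOFS =====

-- the surviving (position, character) pairs of s, positions counted from i
def surv (cs : List Char) (i : Int) (removed : List Int) : List (Int × Char) :=
  (PySem.List.enumerate cs i).filter (fun t => !removed.contains t.1)

-- iterator-style subsequence check over the survivor pairs
def consume (ts : List (Int × Char)) : List Char → Bool
  | [] => true
  | q :: ps' =>
    match ts.dropWhile (fun t => !(t.2 == q)) with
    | [] => false
    | _ :: rest => consume rest ps'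

-- position-oriented greedy: each step takes the first survivor with char q past last
def posGreedy (ts : List (Int × Char)) : List Char → Int → Bool
  | [], _ => true
  | q :: ps', last =>
    match (ts.filter (fun t => decide (last < t.1) && (t.2 == q))).head? with
    | none => false
    | some t => posGreedy ts ps' t.1

def buildDict (ts : List (Int × Char)) : PySem.Dict Char (List Int) :=
  ts.foldl (fun d t => d.modify t.2 [] (· ++ [t.1])) PySem.Dict.empty

theorem surv_cons (c : Char) (cs : List Char) (i : Int) (removed : List Int) :
    surv (c :: cs) i removed =
      if removed.contains i then surv cs (i + 1) removed
      else (i, c) :: surv cs (i + 1) removed := by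
  simp only [surv, PySem.List.enumerate_cons, List.filter_cons]
  by_cases h : removed.contains i
  · simp only [h, Bool.not_true]
    simp
  · simp only [Bool.not_eq_true] at h
    simp only [h, Bool.not_false]
    simp

theorem aLoop_eq_consume (cs : List Char) (i : Int) (ps : List Char) (removed : List Int) :
    aLoop cs i ps removed = consume (surv cs i removed) ps := by
  induction cs generalizing i ps with
  | nil =>
    cases ps <;> simp [aLoop, surv, consume, PySem.List.enumerate]
  | cons c cs' ih =>
    cases ps with
    | nil => simp [aLoop, consume]
    | cons q ps' =>
      rw [surv_cons]
      by_cases hm : i ∈ removed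
      · by_cases hq : c = q <;>
          simp [aLoop, consume, List.contains_eq_mem, hm, hq, ih]
      · by_cases hq : c = q <;>
          simp [aLoop, consume, List.contains_eq_mem, hm, hq, ih]

theorem mem_surv_ge (cs : List Char) (i : Int) (removed : List Int) :
    ∀ t ∈ surv cs i removed, i ≤ t.1 := by
  intro t ht
  have := List.mem_of_mem_filter ht
  rw [PySem.List.mem_enumerate_iff] at this
  obtain ⟨k, hk, rfl⟩ := this
  simp

theorem surv_sorted (cs : List Char) (i : Int) (removed : List Int) :
    (surv cs i removed).Pairwise (fun a b => a.1 < b.1) :=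
  List.Pairwise.filter _ (PySem.List.pairwise_lt_enumerate cs i)

theorem head?_filter_eq (l : List (Int × Char)) (p : (Int × Char) → Bool) :
    (l.filter p).head? = (l.dropWhile (fun x => !p x)).head? := by
  induction l with
  | nil => simp
  | cons a l ih =>
    by_cases h : p a <;> simp [h, ih]

theorem filter_lt_trans (l : List (Int × Char)) (a b : Int) (h : a < b) :
    l.filter (fun x => decide (b < x.1)) =
      (l.filter (fun x => decide (a < x.1))).filter (fun x => decide (b < x.1)) := by
  rw [List.filter_filter]
  apply List.filter_congr
  intro x _
  by_cases hb : b < x.1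
  · have : a < x.1 := by omega
    simp [hb, this]
  · simp [hb]

theorem filter_and (l : List (Int × Char)) (P Q : (Int × Char) → Bool) :
    l.filter (fun t => P t && Q t) = (l.filter P).filter Q := by
  induction l with
  | nil => simp
  | cons a l ih =>
    by_cases hp : P a <;> by_cases hq : Q a <;>
      simp [hp, hq, ih]

theorem posGreedy_congr (ps : List Char) (ts ts' : List (Int × Char)) (last : Int)
    (h : ts.filter (fun x => decide (last < x.1)) = ts'.filter (fun x => decide (last < x.1))) :
    posGreedy ts ps last = posGreedy ts' ps last := by
  induction ps generalizing ts ts' last with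
  | nil => simp [posGreedy]
  | cons q ps' ih =>
    have hfq : ts.filter (fun t => decide (last < t.1) && (t.2 == q)) =
        ts'.filter (fun t => decide (last < t.1) && (t.2 == q)) := by
      rw [filter_and ts _ _, filter_and ts' _ _, h]
    simp only [posGreedy, hfq]
    cases hh : (ts'.filter (fun t => decide (last < t.1) && (t.2 == q))).head? with
    | none => rfl
    | some t =>
      have ht : t ∈ ts'.filter (fun t => decide (last < t.1) && (t.2 == q)) := by
        cases hl : ts'.filter (fun t => decide (last < t.1) && (t.2 == q)) with
        | nil => simp [hl] at hh
        | cons u rest => rw [hl] at hh; simp at hh; simp [hh]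
      have hlt : last < t.1 := by
        have := List.of_mem_filter ht
        simp at this
        exact this.1
      exact ih ts ts' t.1 (by rw [filter_lt_trans ts last t.1 hlt,
        filter_lt_trans ts' last t.1 hlt, h])

theorem consume_eq_posGreedy (ps : List Char) (ts : List (Int × Char)) (last : Int)
    (hs : ts.Pairwise (fun a b => a.1 < b.1)) (hall : ∀ t ∈ ts, last < t.1) :
    consume ts ps = posGreedy ts ps last := by
  induction ps generalizing ts last with
  | nil => simp [consume, posGreedy]
  | cons q ps' ih =>
    have hfilter : ts.filter (fun t => decide (last < t.1) && (t.2 == q)) =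
        ts.filter (fun t => t.2 == q) := by
      apply List.filter_congr
      intro x hx
      simp [hall x hx]
    have hhead : (ts.filter (fun t => decide (last < t.1) && (t.2 == q))).head? =
        (ts.dropWhile (fun t => !(t.2 == q))).head? := by
      rw [hfilter]; exact head?_filter_eq ts _
    simp only [consume, posGreedy]
    cases hd : ts.dropWhile (fun t => !(t.2 == q)) with
    | nil => rw [hhead, hd]; rfl
    | cons t rest =>
      rw [hhead, hd]
      simp only [List.head?_cons]
      -- ts = takeWhile ++ t :: rest, prefix and t have positions ≤ t.1, rest > t.1
      have hsplit : ts.takeWhile (fun t => !(t.2 == q)) ++ t :: rest = ts := by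
        rw [← hd]; exact List.takeWhile_append_dropWhile
      have hsorted' : (t :: rest).Pairwise (fun a b => a.1 < b.1) := by
        have : (ts.takeWhile (fun t => !(t.2 == q)) ++ t :: rest).Pairwise
            (fun a b => a.1 < b.1) := by rw [hsplit]; exact hs
        exact (List.pairwise_append.mp this).2.1
      have hrest_sorted : rest.Pairwise (fun a b => a.1 < b.1) :=
        (List.pairwise_cons.mp hsorted').2
      have hrest_gt : ∀ x ∈ rest, t.1 < x.1 := (List.pairwise_cons.mp hsorted').1
      have hprefix_lt : ∀ x ∈ ts.takeWhile (fun t => !(t.2 == q)), x.1 < t.1 := by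
        have hP : (ts.takeWhile (fun t => !(t.2 == q)) ++ t :: rest).Pairwise
            (fun a b => a.1 < b.1) := by rw [hsplit]; exact hs
        intro x hx
        exact (List.pairwise_append.mp hP).2.2 x hx t (by simp)
      have hfts : ts.filter (fun x => decide (t.1 < x.1)) = rest := by
        rw [← hsplit, List.filter_append, List.filter_cons]
        have h1 : (ts.takeWhile (fun t => !(t.2 == q))).filter
            (fun x => decide (t.1 < x.1)) = [] := by
          rw [List.filter_eq_nil_iff]
          intro x hx
          simp
          have := hprefix_lt x hx
          omega
        have h2 : rest.filter (fun x => decide (t.1 < x.1)) = rest := by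
          rw [List.filter_eq_self]
          intro x hx
          simp [hrest_gt x hx]
        simp [h1, h2]
      have hfr : rest.filter (fun x => decide (t.1 < x.1)) = rest := by
        rw [List.filter_eq_self]
        intro x hx
        simp [hrest_gt x hx]
      calc consume rest ps' = posGreedy rest ps' t.1 := ih rest t.1 hrest_sorted hrest_gt
        _ = posGreedy ts ps' t.1 := posGreedy_congr ps' rest ts t.1 (by rw [hfr, hfts])

-- bisection: value-vs-index characterisation on a sorted list
theorem sorted_getD_iff (lst : List Int) (last : Int) (hs : lst.Pairwise (· < ·)) :
    ∀ i < lst.length, (lst.getD i 0 ≤ last ↔ i < (lst.takeWhile (fun x => decide (x ≤ last))).length) := by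
  induction lst with
  | nil => simp
  | cons a l ih =>
    intro i hi
    rw [List.takeWhile_cons]
    by_cases ha : a ≤ last
    · cases i with
      | zero => simp [ha]
      | succ n =>
        have hn : n < l.length := by simpa using hi
        simp only [List.getD_cons_succ, ha, decide_true, if_true, List.length_cons]
        rw [ih (List.pairwise_cons.mp hs).2 n hn]
        omega
    · cases i with
      | zero => simp [ha]
      | succ n =>
        have hn : n < l.length := by simpa using hi
        have hmem : l.getD n 0 ∈ l := by
          rw [List.getD_eq_getElem l 0 hn]; exact List.getElem_mem hn
        have hgt := (List.pairwise_cons.mp hs).1 _ hmem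
        simp only [List.getD_cons_succ, ha, decide_false]
        simp only [if_neg Bool.false_ne_true, List.length_nil]
        constructor
        · intro h; omega
        · omega

theorem bisect_inv (lst : List Int) (last : Int) (k : Nat)
    (hp : ∀ i < lst.length, (lst.getD i 0 ≤ last ↔ i < k)) :
    ∀ fuel lo hi, hi - lo ≤ fuel → lo ≤ k → k ≤ hi → hi ≤ lst.length →
      bisectGT lst last fuel lo hi = k := by
  intro fuel
  induction fuel with
  | zero =>
    intro lo hi hn hlo hhi _
    simp only [bisectGT]
    omega
  | succ fuel ihn =>
    intro lo hi hn hlo hhi hlen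
    rw [bisectGT]
    by_cases h : lo < hi
    · simp only [h, if_pos]
      have hmid : (lo + hi) / 2 < lst.length := by omega
      by_cases hle : lst.getD ((lo + hi) / 2) 0 ≤ last
      · have hk : (lo + hi) / 2 < k := (hp _ hmid).mp hle
        simp only [hle, if_pos]
        exact ihn _ _ (by omega) (by omega) hhi hlen
      · have hk : k ≤ (lo + hi) / 2 := by
          by_contra hc
          exact hle ((hp _ hmid).mpr (by omega))
        simp only [hle, if_neg, not_false_iff]
        exact ihn _ _ (by omega) hlo hk (by omega)
    · simp only [h, if_neg, not_false_iff]
      omega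

theorem bisect_eq (lst : List Int) (last : Int) (hs : lst.Pairwise (· < ·)) :
    bisectGT lst last lst.length 0 lst.length = (lst.takeWhile (fun x => decide (x ≤ last))).length := by
  apply bisect_inv lst last _ (sorted_getD_iff lst last hs) lst.length 0 lst.length (by omega)
  · exact Nat.zero_le _
  · exact (List.takeWhile_prefix _).length_le
  · exact le_refl _

theorem sorted_dropWhile_eq_filter (lst : List Int) (last : Int) (hs : lst.Pairwise (· < ·)) :
    lst.dropWhile (fun x => decide (x ≤ last)) = lst.filter (fun x => decide (last < x)) := by
  induction lst with
  | nil => simp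
  | cons a l ih =>
    rw [List.dropWhile_cons, List.filter_cons]
    by_cases ha : a ≤ last
    · simp only [ha, decide_true]
      have : ¬ last < a := by omega
      simp [this, ih (List.pairwise_cons.mp hs).2]
    · have hlt : last < a := by omega
      simp only [ha, decide_false, hlt, decide_true]
      have : l.filter (fun x => decide (last < x)) = l := by
        rw [List.filter_eq_self]
        intro x hx
        have := (List.pairwise_cons.mp hs).1 x hx
        simp; omega
      simp [this]

-- dict lemmas: buildDict ts indexes the occurrence positions of each char
theorem buildDict_getD (ts : List (Int × Char)) (q : Char) :
    (buildDict ts).getD q [] = (ts.filter (fun t => t.2 == q)).map (·.1) := by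
  have hswap : buildDict ts =
      (ts.map Prod.swap).foldl (fun d p => d.modify p.1 [] (· ++ [p.2])) PySem.Dict.empty := by
    rw [List.foldl_map]; rfl
  rw [hswap, PySem.Dict.getD_foldl_modify_append, PySem.Dict.getD_empty]
  rw [List.filter_map, List.map_map]
  rfl

theorem buildDict_get?_none (ts : List (Int × Char)) (q : Char)
    (h : (buildDict ts).get? q = none) : ts.filter (fun t => t.2 == q) = [] := by
  rw [List.filter_eq_nil_iff]
  intro t ht hq
  have hk : q ∈ (buildDict ts).keys := by
    unfold buildDict
    rw [PySem.Dict.keys_foldl_modify_key ts (fun t => t.2) [] (fun d t v => v ++ [t.1])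
      PySem.Dict.empty]
    rw [PySem.Dict.keys_empty]
    rw [PySem.Set.mem_update]
    right
    have : t.2 = q := by simpa using hq
    exact this ▸ List.mem_map_of_mem ht
  rw [PySem.Dict.get?_eq_none_iff_not_mem_keys] at h
  exact h hk

theorem buildDict_get?_some (ts : List (Int × Char)) (q : Char) (lst : List Int)
    (h : (buildDict ts).get? q = some lst) :
    lst = (ts.filter (fun t => t.2 == q)).map (·.1) := by
  have := buildDict_getD ts q
  rw [PySem.Dict.getD_eq_get?_getD, h] at this
  simpa using this

theorem drop_takeWhile (l : List Int) (p : Int → Bool) :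
    l.drop (l.takeWhile p).length = l.dropWhile p := by
  induction l with
  | nil => simp
  | cons a l ih =>
    by_cases h : p a <;> simp [h, ih]

theorem bLoop_eq_posGreedy (ps : List Char) (ts : List (Int × Char)) (last : Int)
    (hs : ts.Pairwise (fun a b => a.1 < b.1)) :
    bLoop (buildDict ts) ps last = posGreedy ts ps last := by
  induction ps generalizing last with
  | nil => simp [bLoop, posGreedy]
  | cons q ps' ih =>
    simp only [bLoop, posGreedy]
    cases hget : (buildDict ts).get? q with
    | none =>
      have hnil := buildDict_get?_none ts q hget
      have hcnil : ts.filter (fun t => decide (last < t.1) && (t.2 == q)) = [] := by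
        rw [List.filter_eq_nil_iff] at hnil ⊢
        intro t ht hb
        simp only [Bool.and_eq_true] at hb
        exact hnil t ht hb.2
      simp [hcnil]
    | some lst =>
      have hlst : lst = (ts.filter (fun t => t.2 == q)).map (·.1) :=
        buildDict_get?_some ts q lst hget
      have hsort_occ : lst.Pairwise (· < ·) := by
        rw [hlst]
        exact List.Pairwise.map _ (fun a b h => h) (List.Pairwise.filter _ hs)
      have hkeq : bisectGT lst last lst.length 0 lst.length =
          (lst.takeWhile (fun x => decide (x ≤ last))).length := bisect_eq lst last hsort_occ
      have hM : lst.filter (fun x => decide (last < x)) =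
          (ts.filter (fun t => decide (last < t.1) && (t.2 == q))).map (·.1) := by
        rw [hlst, List.filter_map]
        rw [filter_and ts (fun t => decide (last < t.1)) (fun t => t.2 == q)]
        have hcomm : ((ts.filter (fun t => decide (last < t.1))).filter (fun t => t.2 == q))
            = (ts.filter (fun t => t.2 == q)).filter (fun t => decide (last < t.1)) := by
          rw [← filter_and, ← filter_and]
          apply List.filter_congr
          intro x _
          exact Bool.and_comm _ _
        rw [hcomm]
        rfl
      have hfd : lst.filter (fun x => decide (last < x)) =
          lst.dropWhile (fun x => decide (x ≤ last)) :=
        (sorted_dropWhile_eq_filter lst last hsort_occ).symm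
      by_cases hkl : bisectGT lst last lst.length 0 lst.length = lst.length
      · -- every indexed position is ≤ last: no usable occurrence
        have htw : lst.takeWhile (fun x => decide (x ≤ last)) = lst :=
          (List.takeWhile_prefix _).eq_of_length (by omega)
        have hdw : lst.dropWhile (fun x => decide (x ≤ last)) = [] := by
          have hsplit := List.takeWhile_append_dropWhile
            (p := fun x => decide (x ≤ last)) (l := lst)
          rw [htw] at hsplit
          have : lst ++ lst.dropWhile (fun x => decide (x ≤ last)) = lst ++ [] := by
            simpa using hsplit
          exact List.append_cancel_left this
        have hcnil : ts.filter (fun t => decide (last < t.1) && (t.2 == q)) = [] := by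
          have : (ts.filter (fun t => decide (last < t.1) && (t.2 == q))).map (·.1) = [] := by
            rw [← hM, hfd, hdw]
          exact List.map_eq_nil_iff.mp this
        simp [hkl, hcnil]
      · -- a usable occurrence exists; the bisection lands on it
        have hlen : bisectGT lst last lst.length 0 lst.length < lst.length :=
          lt_of_le_of_ne (hkeq ▸ (List.takeWhile_prefix _).length_le) hkl
        have hdrop : lst.drop (bisectGT lst last lst.length 0 lst.length) =
            lst.dropWhile (fun x => decide (x ≤ last)) := by
          rw [hkeq]
          exact drop_takeWhile lst _
        cases hcomb : ts.filter (fun t => decide (last < t.1) && (t.2 == q)) with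
        | nil =>
          exfalso
          have : lst.drop (bisectGT lst last lst.length 0 lst.length) = [] := by
            rw [hdrop, ← hfd, hM, hcomb]; rfl
          have := congrArg List.length this
          simp at this
          omega
        | cons t rest =>
          have hgetD : lst.getD (bisectGT lst last lst.length 0 lst.length) 0 = t.1 := by
            have hd : lst.drop (bisectGT lst last lst.length 0 lst.length) =
                t.1 :: rest.map (·.1) := by
              rw [hdrop, ← hfd, hM, hcomb]; rfl
            rw [List.getD_eq_getElem?_getD, ← List.head?_drop, hd]
            rfl
          simp only [hkl, if_neg, not_false_iff, List.head?_cons, hgetD]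
          exact ih t.1

theorem foldl_if_skip (l : List (Int × Char)) (removed : List Int)
    (d : PySem.Dict Char (List Int)) :
    l.foldl (fun d t => if removed.contains t.1 then d else d.modify t.2 [] (· ++ [t.1])) d =
      (l.filter (fun t => !removed.contains t.1)).foldl
        (fun d t => d.modify t.2 [] (· ++ [t.1])) d := by
  induction l generalizing d with
  | nil => rfl
  | cons a l ih =>
    by_cases h : removed.contains a.1
    · rw [List.foldl_cons, if_pos h, List.filter_cons, if_neg (by rw [h]; decide)]
      exact ih d
    · simp only [Bool.not_eq_true] at h
      rw [List.foldl_cons, if_neg (by rw [h]; decide), List.filter_cons,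
        if_pos (by rw [h]; decide), List.foldl_cons]
      exact ih _

-- ===== VERDICT (by name: the statement is the Claim_ definition above) =====
theorem check_subseq_spec : Claim_equal_check_subseq := by
  intro s p removed _
  unfold Spec_check_subseq check_subseq check_subseq_alt
  rw [foldl_if_skip]
  have hsorted := surv_sorted s.toList 0 removed
  have hall : ∀ t ∈ surv s.toList 0 removed, (-1 : Int) < t.1 := by
    intro t ht
    have := mem_surv_ge s.toList 0 removed t ht
    omega
  calc aLoop s.toList 0 p.toList removed
      = consume (surv s.toList 0 removed) p.toList := aLoop_eq_consume _ _ _ _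
    _ = posGreedy (surv s.toList 0 removed) p.toList (-1) :=
        consume_eq_posGreedy _ _ _ hsorted hall
    _ = bLoop (buildDict (surv s.toList 0 removed)) p.toList (-1) :=
        (bLoop_eq_posGreedy _ _ _ hsorted).symm
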